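-- pv_equiv track=rewrite | github.com/Dman603/Examples | PE54.py | three_of_a_kind
-- ===== SOURCE A (Python) =====
-- def three_of_a_kind(p1,p2):
--     order = ['','2','3','4','5','6','7','8','9','T','J','Q','K','A']
--     p1c = ''
--     p2c = ''
--     for o in order[1:]:
--         cnt = 0
--         for c in p1:
--             if c[:-1]==o: cnt+=1
--         if cnt == 3:
--             p1c = o
--
--     for o in order[1:]:
--         cnt = 0
--         for c in p2:
--             if c[:-1]==o: cnt+=1
--         if cnt == 3:
--             p2c = o
--
--     if order.index(p1c)>order.index(p2c):
--         return 1
--     elif order.index(p1c)<order.index(p2c):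
--         return -1
--     else: return 0
-- ===== SOURCE B (Python) =====
-- def three_of_a_kind(p1, p2):
--     order = ['','2','3','4','5','6','7','8','9','T','J','Q','K','A']
--     def trip_idx(hand):
--         counts = {}
--         for c in hand:
--             r = c[:-1]
--             counts[r] = counts.get(r, 0) + 1
--         best = 0
--         for r, n in counts.items():
--             if n == 3 and r in order:
--                 i = order.index(r)
--                 if i > best:
--                     best = i
--         return best
--     i1 = trip_idx(p1)
--     i2 = trip_idx(p2)
--     return (i1 > i2) - (i1 < i2)
-- ===== Notes on version B (the rewrite author's own statement) =====
-- stated objective: faster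
-- what changed: B builds one rank-count dictionary per hand in a single pass and takes the max order-index over the distinct ranks with count 3, instead of A's rescan of the whole hand for each of the 13 ranks; the comparison becomes (i1>i2)-(i1<i2).
import Mathlib
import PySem

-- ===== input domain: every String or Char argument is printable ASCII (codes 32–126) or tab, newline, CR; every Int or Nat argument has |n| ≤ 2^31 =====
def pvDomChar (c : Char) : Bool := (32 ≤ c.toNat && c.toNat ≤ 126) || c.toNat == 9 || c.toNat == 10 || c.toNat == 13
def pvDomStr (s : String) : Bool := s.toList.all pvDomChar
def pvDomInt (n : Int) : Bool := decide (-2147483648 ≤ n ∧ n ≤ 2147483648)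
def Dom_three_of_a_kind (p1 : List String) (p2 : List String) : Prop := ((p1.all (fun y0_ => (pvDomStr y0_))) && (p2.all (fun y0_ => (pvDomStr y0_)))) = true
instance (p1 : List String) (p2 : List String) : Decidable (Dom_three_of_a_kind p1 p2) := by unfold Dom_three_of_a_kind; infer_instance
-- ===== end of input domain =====

-- B replaces A's 13×n rescans per hand by one rank-Counter pass plus a max over the
-- distinct ranks present (objective: simpler/alternative; return values proved equal).

-- ===== PORT A =====
def pvOrder : List String := ["","2","3","4","5","6","7","8","9","T","J","Q","K","A"]

-- the fold over order[1:] keeping the last rank with count 3 (A's two identical loops)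
def pvTripA (hand : List String) : String :=
  (PySem.List.slice pvOrder (some 1) none).foldl (fun pc o =>
    let cnt : Int := hand.foldl (fun cnt c =>
      if PySem.Str.slice c none (some (-1)) == o then cnt + 1 else cnt) 0
    if cnt == 3 then o else pc) ""

def three_of_a_kind (p1 : List String) (p2 : List String) : Int :=
  let p1c := pvTripA p1
  let p2c := pvTripA p2
  -- order.index never raises here (p1c, p2c ∈ order); the `none` arm is a totality guard
  match PySem.List.index? pvOrder p1c, PySem.List.index? pvOrder p2c with
  | some i1, some i2 => if i1 > i2 then 1 else if i1 < i2 then -1 else 0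
  | _, _ => 0

-- ===== PORT B =====
-- counts = {}; for c in hand: counts[c[:-1]] = counts.get(c[:-1],0)+1; then max index of a rank with count 3
def pvTripIdxB (hand : List String) : Nat :=
  let counts := hand.foldl (fun d c =>
      let r := PySem.Str.slice c none (some (-1))
      d.insert r (d.getD r 0 + 1)) (PySem.Dict.empty : PySem.Dict String Int)
  counts.items.foldl (fun best rn =>
      if rn.2 == 3 && pvOrder.contains rn.1 then
        let i := (PySem.List.index? pvOrder rn.1).getD 0
        if i > best then i else best
      else best) 0

def three_of_a_kind_alt (p1 : List String) (p2 : List String) : Int :=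
  let i1 := pvTripIdxB p1
  let i2 := pvTripIdxB p2
  (if i1 > i2 then (1 : Int) else 0) - (if i1 < i2 then (1 : Int) else 0)

-- ===== PRECONDITION & SPEC =====
def Spec_three_of_a_kind (p1 : List String) (p2 : List String) (out : Int) : Prop := out = three_of_a_kind_alt p1 p2
instance (p1 : List String) (p2 : List String) (out : Int) : Decidable (Spec_three_of_a_kind p1 p2 out) := by unfold Spec_three_of_a_kind; infer_instance

-- ===== CLAIM (what is proved, stated in full; the proofs are below) =====
def Claim_equal_three_of_a_kind : Prop := ∀ (p1 : List String) (p2 : List String), Dom_three_of_a_kind p1 p2 → Spec_three_of_a_kind p1 p2 (three_of_a_kind p1 p2)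

-- ===== LEMMAS AND PROOFS =====

-- the multiset of ranks of a hand (c[:-1] for each card)
def pvRanks (hand : List String) : List String :=
  hand.map (fun c => PySem.Str.slice c none (some (-1)))

-- A's inner counting loop counts the rank o in the hand
theorem pvCntEq (hand : List String) (o : String) :
    hand.foldl (fun cnt c =>
      if PySem.Str.slice c none (some (-1)) == o then cnt + 1 else cnt) (0 : Int)
      = ((pvRanks hand).count o : Int) := by
  have h := PySem.List.foldl_beq_add_one (pvRanks hand) o 0
  rw [pvRanks, List.foldl_map] at h
  simpa using h

-- first rank (descending) whose count is 3, as A's last-match fold computes it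
def pvPairs : List (String × Nat) :=
  [("A", 13), ("K", 12), ("Q", 11), ("J", 10), ("T", 9), ("9", 8), ("8", 7),
   ("7", 6), ("6", 5), ("5", 4), ("4", 3), ("3", 2), ("2", 1)]

def pvNF : List (String × Nat) → List String → Nat
  | [], _ => 0
  | (r, v) :: rest, ranks => if ((ranks.count r : Int) == 3) then v else pvNF rest ranks

-- the trip index both implementations compute
def pvN (hand : List String) : Nat := pvNF pvPairs (pvRanks hand)

theorem pvAIdx (hand : List String) :
    PySem.List.index? pvOrder (pvTripA hand) = some (pvN hand) := by
  have ht : PySem.List.slice pvOrder (some 1) none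
      = ["2","3","4","5","6","7","8","9","T","J","Q","K","A"] := by
    rw [PySem.List.slice_from_one]; rfl
  rw [pvTripA, ht]
  simp only [List.foldl_cons, List.foldl_nil, pvCntEq]
  simp only [pvN, pvPairs, pvNF]
  have h0 : PySem.List.index? pvOrder "" = some 0 := by decide
  have h1 : PySem.List.index? pvOrder "2" = some 1 := by decide
  have h2 : PySem.List.index? pvOrder "3" = some 2 := by decide
  have h3 : PySem.List.index? pvOrder "4" = some 3 := by decide
  have h4 : PySem.List.index? pvOrder "5" = some 4 := by decide
  have h5 : PySem.List.index? pvOrder "6" = some 5 := by decide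
  have h6 : PySem.List.index? pvOrder "7" = some 6 := by decide
  have h7 : PySem.List.index? pvOrder "8" = some 7 := by decide
  have h8 : PySem.List.index? pvOrder "9" = some 8 := by decide
  have h9 : PySem.List.index? pvOrder "T" = some 9 := by decide
  have h10 : PySem.List.index? pvOrder "J" = some 10 := by decide
  have h11 : PySem.List.index? pvOrder "Q" = some 11 := by decide
  have h12 : PySem.List.index? pvOrder "K" = some 12 := by decide
  have h13 : PySem.List.index? pvOrder "A" = some 13 := by decide
  simp only [apply_ite (PySem.List.index? pvOrder), apply_ite (some : Nat → Option Nat),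
    h0, h1, h2, h3, h4, h5, h6, h7, h8, h9, h10, h11, h12, h13]

-- max-fold bound for B's scan over the counter items
theorem pvFoldMax_le (l : List Nat) (a n : Nat) (ha : a ≤ n) (hl : ∀ x ∈ l, x ≤ n) :
    l.foldl max a ≤ n := by
  induction l generalizing a with
  | nil => exact ha
  | cons x xs ih =>
    exact ih (max a x) (max_le ha (hl x (by simp))) (fun y hy => hl y (by simp [hy]))

-- the contribution of one distinct rank to B's scan
def pvH (hand : List String) (k : String) : Nat :=
  if (((pvRanks hand).count k : Int) == 3) && pvOrder.contains k then
    (PySem.List.index? pvOrder k).getD 0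
  else 0

theorem pvBfold (hand : List String) :
    pvTripIdxB hand
      = (((PySem.Set.ofList (pvRanks hand)).map (pvH hand)).foldl max 0 : Nat) := by
  rw [pvTripIdxB]
  have hc : (hand.foldl (fun d c =>
      let r := PySem.Str.slice c none (some (-1))
      d.insert r (d.getD r 0 + 1)) (PySem.Dict.empty : PySem.Dict String Int))
      = PySem.Dict.counter (pvRanks hand) := by
    have h := PySem.Dict.foldl_insert_getD_add_one_eq_counter (pvRanks hand)
    rw [pvRanks, List.foldl_map] at h
    exact h
  rw [hc, PySem.Dict.items_counter, List.foldl_map, List.foldl_map]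
  congr 1
  funext b k
  by_cases hcond : ((((pvRanks hand).count k : Int) == 3) && pvOrder.contains k) = true
  · simp only [pvH, hcond, if_true]
    split_ifs <;> omega
  · simp only [pvH, hcond, Bool.false_eq_true, if_false]
    omega

theorem pvNF_ge (ranks : List String) (L : List (String × Nat)) (r : String) (v : Nat)
    (hmem : (r, v) ∈ L) (hsort : L.Pairwise (fun p q => q.2 ≤ p.2))
    (hcond : (((ranks.count r : Int)) == 3) = true) :
    v ≤ pvNF L ranks := by
  induction L with
  | nil => cases hmem
  | cons p rest ih =>
    obtain ⟨a, b⟩ := p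
    rw [pvNF]
    by_cases h : (((ranks.count a : Int)) == 3) = true
    · rw [if_pos h]
      rcases List.mem_cons.mp hmem with heq | hrest
      · cases heq; exact Nat.le_refl _
      · exact (List.pairwise_cons.mp hsort).1 (r, v) hrest
    · rw [if_neg h]
      rcases List.mem_cons.mp hmem with heq | hrest
      · cases heq; exact absurd hcond h
      · exact ih hrest (List.pairwise_cons.mp hsort).2

theorem pvNF_cases (ranks : List String) (L : List (String × Nat)) :
    pvNF L ranks = 0 ∨
      ∃ r v, (r, v) ∈ L ∧ (((ranks.count r : Int)) == 3) = true ∧ pvNF L ranks = v := by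
  induction L with
  | nil => exact Or.inl rfl
  | cons p rest ih =>
    obtain ⟨a, b⟩ := p
    rw [pvNF]
    by_cases h : (((ranks.count a : Int)) == 3) = true
    · exact Or.inr ⟨a, b, List.mem_cons_self .., h, if_pos h⟩
    · rw [if_neg h]
      rcases ih with h0 | ⟨r, v, hm, hc, he⟩
      · exact Or.inl h0
      · exact Or.inr ⟨r, v, List.mem_cons_of_mem _ hm, hc, he⟩

theorem pvH_le (hand : List String) (k : String) : pvH hand k ≤ pvN hand := by
  by_cases hcond : ((((pvRanks hand).count k : Int) == 3) && pvOrder.contains k) = true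
  · rw [pvH, if_pos hcond]
    rw [Bool.and_eq_true] at hcond
    obtain ⟨hcnt, hmem⟩ := hcond
    have hk := List.mem_of_elem_eq_true hmem
    have hcase : ∀ x ∈ pvOrder,
        x = "" ∨ (x, (PySem.List.index? pvOrder x).getD 0) ∈ pvPairs := by decide
    rcases hcase k hk with rfl | hp
    · exact le_trans (le_of_eq (by decide)) (Nat.zero_le _)
    · rw [pvN]
      exact pvNF_ge _ _ _ _ hp (by decide) hcnt
  · rw [pvH, if_neg hcond]
    exact Nat.zero_le _

theorem pvMemFold (hand : List String) (r : String)
    (h : ((((pvRanks hand).count r : Int)) == 3) = true) :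
    pvH hand r ≤ ((PySem.Set.ofList (pvRanks hand)).map (pvH hand)).foldl max 0 := by
  have hr : r ∈ pvRanks hand := by
    have h3 : ((pvRanks hand).count r : Int) = 3 := beq_iff_eq.mp h
    exact List.count_pos_iff.mp (by omega)
  exact (PySem.List.le_foldl_max _ 0).2 _
    (List.mem_map.mpr ⟨r, (PySem.Set.mem_ofList _ _).mpr hr, rfl⟩)

theorem pvBIdx (hand : List String) : pvTripIdxB hand = pvN hand := by
  rw [pvBfold]
  apply Nat.le_antisymm
  · apply pvFoldMax_le _ _ _ (Nat.zero_le _)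
    intro x hx
    obtain ⟨k, _, rfl⟩ := List.mem_map.mp hx
    exact pvH_le hand k
  · rcases pvNF_cases (pvRanks hand) pvPairs with h0 | ⟨r, v, hmem, hcond, heq⟩
    · rw [pvN, h0]
      exact Nat.zero_le _
    · rw [pvN, heq]
      have hfact : ∀ p ∈ pvPairs, pvOrder.contains p.1 = true ∧
          (PySem.List.index? pvOrder p.1).getD 0 = p.2 := by decide
      have hv : pvH hand r = v := by
        rw [pvH, if_pos (by rw [Bool.and_eq_true]; exact ⟨hcond, (hfact (r, v) hmem).1⟩)]
        exact (hfact (r, v) hmem).2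
      exact hv ▸ pvMemFold hand r hcond

-- ===== VERDICT (by name: the statement is the Claim_ definition above) =====
theorem three_of_a_kind_spec : Claim_equal_three_of_a_kind := by
  intro p1 p2 _
  unfold Spec_three_of_a_kind three_of_a_kind three_of_a_kind_alt
  show (match PySem.List.index? pvOrder (pvTripA p1), PySem.List.index? pvOrder (pvTripA p2) with
    | some i1, some i2 => if i1 > i2 then (1:Int) else if i1 < i2 then -1 else 0
    | _, _ => 0)
    = ((if pvTripIdxB p1 > pvTripIdxB p2 then (1:Int) else 0) - (if pvTripIdxB p1 < pvTripIdxB p2 then (1:Int) else 0))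
  rw [pvAIdx p1, pvAIdx p2, pvBIdx p1, pvBIdx p2]
  rcases Nat.lt_trichotomy (pvN p1) (pvN p2) with h | h | h
  · simp [h, Nat.lt_asymm h]
  · simp [h]
  · simp [h, Nat.lt_asymm h]
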